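-- pv_equiv track=rewrite | github.com/joaovitormgv/financeManager | script.py | organize_thousands
-- ===== SOURCE A (Python) =====
-- def organize_thousands(lines):
--     '''
--     This function receives a list of strings and returns a list of strings with the thousands separator organized.
--
--     Like, if there is a number like 1.000,00, it will be transformed into 1000,00.
--
--     csv files reader have a problem with the thousands separator, if it is not consistent.
--
--     :param lines: list of strings
--     '''
--
--     processed_lines = []
--     for line in lines:
--         new_line = ''
--         i = 0
--         while i < len(line):
--             if line[i] == '.' and i + 4 < len(line) and line[i + 4] == ',':
--                 new_line += ''
--                 i += 1
--             else:
--                 new_line += line[i]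
--                 i += 1
--         processed_lines.append(new_line)
--     return processed_lines
-- ===== SOURCE B (Python) =====
-- import re
--
-- _THOUSANDS_DOT = re.compile(r'\.(?=[\s\S]{3},)')
--
-- def organize_thousands(lines):
--     return [_THOUSANDS_DOT.sub('', line) for line in lines]
-- ===== Notes on version B (the rewrite author's own statement) =====
-- stated objective: idiomatic
-- what changed: The hand-written while-loop with an index counter and string accumulation is replaced by one precompiled regex substitution per line (delete '.' when a ',' follows 4 positions later, via a zero-width lookahead) over a list comprehension.
import Mathlib
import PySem

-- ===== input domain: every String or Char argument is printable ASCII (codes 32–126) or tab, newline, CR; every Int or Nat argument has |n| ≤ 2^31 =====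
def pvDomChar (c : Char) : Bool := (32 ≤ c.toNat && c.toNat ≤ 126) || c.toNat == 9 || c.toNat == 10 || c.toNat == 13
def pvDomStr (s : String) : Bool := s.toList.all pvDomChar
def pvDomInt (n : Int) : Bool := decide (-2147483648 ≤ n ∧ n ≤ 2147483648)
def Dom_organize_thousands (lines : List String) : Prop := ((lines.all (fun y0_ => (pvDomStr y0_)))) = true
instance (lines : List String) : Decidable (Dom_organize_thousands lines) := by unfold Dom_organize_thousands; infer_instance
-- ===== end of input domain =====

-- B replaces A's hand-written index/while scan and string accumulation by a single
-- regex substitution per line (idiomatic; same observable behaviour).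

-- ===== PORT A =====
-- A's while loop over index i, transcribed as recursion on the suffix starting at i:
-- the test 'i + 4 < len(line) and line[i+4] == ","' is, relative to the suffix c :: rest,
-- exactly 'rest[3]? = some ',''.
def pvProcA : List Char → List Char
  | [] => []
  | c :: rest =>
      if c = '.' ∧ rest[3]? = some ',' then pvProcA rest else c :: pvProcA rest

def organize_thousands (lines : List String) : List String :=
  lines.map (fun line => String.ofList (pvProcA line.toList))

-- ===== PORT B =====
-- Hand port of re.sub(r'\.(?=[\s\S]{3},)', '', line): the lookahead is zero-width, so the
-- substitution deletes exactly every '.' at index i of the ORIGINAL line such that index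
-- i+4 exists and holds ','; this filter over the enumerated characters is exact for that
-- pattern (no PySem regex primitive exists).
def pvProcB (cs : List Char) : List Char :=
  ((PySem.List.enumerate cs 0).filter
      (fun p => decide (¬(p.2 = '.' ∧ PySem.List.pyGet? cs (p.1 + 4) = some ',')))).map (·.2)

def organize_thousands_alt (lines : List String) : List String :=
  lines.map (fun line => String.ofList (pvProcB line.toList))

-- ===== PRECONDITION & SPEC =====
def Spec_organize_thousands (lines : List String) (out : List String) : Prop := out = organize_thousands_alt lines
instance (lines : List String) (out : List String) : Decidable (Spec_organize_thousands lines out) := by unfold Spec_organize_thousands; infer_instance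

-- ===== CLAIM (what is proved, stated in full; the proofs are below) =====
def Claim_equal_organize_thousands : Prop := ∀ (lines : List String), Dom_organize_thousands lines → Spec_organize_thousands lines (organize_thousands lines)

-- ===== LEMMAS AND PROOFS =====

lemma pvProc_aux (rest : List Char) (full : List Char) (n : Nat)
    (h : ∀ j : Nat, full[n + j]? = rest[j]?) :
    ((PySem.List.enumerate rest (n : Int)).filter
        (fun p => decide (¬(p.2 = '.' ∧ PySem.List.pyGet? full (p.1 + 4) = some ',')))).map (·.2)
      = pvProcA rest := by
  induction rest generalizing n with
  | nil => simp [PySem.List.enumerate_nil, pvProcA]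
  | cons c r ih =>
    have hidx : PySem.List.pyGet? full ((n : Int) + 4) = r[3]? := by
      have : ((n : Int) + 4) = ((n + 4 : Nat) : Int) := by push_cast; ring
      rw [this, PySem.List.pyGet?_natCast]
      have := h 4
      simpa using this
    have hrec : ((PySem.List.enumerate r ((n : Int) + 1)).filter
        (fun p => decide (¬(p.2 = '.' ∧ PySem.List.pyGet? full (p.1 + 4) = some ',')))).map (·.2)
        = pvProcA r := by
      have : ((n : Int) + 1) = ((n + 1 : Nat) : Int) := by push_cast; ring
      rw [this]
      exact ih (n + 1) (fun j => by
        have := h (1 + j)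
        simpa [Nat.add_assoc, Nat.add_comm 1 j] using this)
    rw [PySem.List.enumerate_cons]
    by_cases hc : c = '.' ∧ r[3]? = some ','
    · simp only [List.filter_cons, pvProcA, hc]
      rw [if_neg (by simp [hidx, hc.2])]
      exact hrec
    · simp only [List.filter_cons, pvProcA, if_neg hc]
      rw [if_pos (by simp only [decide_eq_true_eq, hidx]; exact hc)]
      simp only [List.map_cons]
      rw [hrec]

lemma pvProc_eq (cs : List Char) : pvProcA cs = pvProcB cs := by
  unfold pvProcB
  have := pvProc_aux cs cs 0 (fun j => by simp)
  simpa using this.symm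

-- ===== VERDICT (by name: the statement is the Claim_ definition above) =====
theorem organize_thousands_spec : Claim_equal_organize_thousands := by
  intro lines _
  unfold Spec_organize_thousands organize_thousands organize_thousands_alt
  simp [pvProc_eq]
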